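-- pv_equiv track=rewrite | github.com/pypi-data/pypi-mirror-366 | packages/gxkit-dbtools/gxkit_dbtools-0.1.2.post6.tar.gz/gxkit_dbtools-0.1.2.post6/gxkit_dbtools/parser/sql_parser.py | _remove_sql_comments
-- ===== SOURCE A (Python) =====
-- def _remove_sql_comments(sql: str) -> str:
--     result = []
--     i = 0
--     in_single_quote = False
--     in_double_quote = False
--     in_line_comment = False
--     in_block_comment = False
--     length = len(sql)
--     while i < length:
--         char = sql[i]
--         next_char = sql[i + 1] if i + 1 < length else ""
--         # 进入字符串状态
--         if not in_line_comment and not in_block_comment: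
--             if not in_double_quote and char == "'":
--                 result.append(char)
--                 in_single_quote = not in_single_quote
--                 i += 1
--                 continue
--             elif not in_single_quote and char == '"':
--                 result.append(char)
--                 in_double_quote = not in_double_quote
--                 i += 1
--                 continue
--         # 忽略字符串中的内容
--         if in_single_quote or in_double_quote:
--             result.append(char)
--             i += 1
--             continue
--         # 开始 block 注释
--         if not in_line_comment and not in_block_comment and char == "/" and next_char == "*":
--             in_block_comment = True
--             i += 2
--             continue
--         # 结束 block 注释
--         if in_block_comment and char == "*" and next_char == "/":
--             in_block_comment = False
--             i += 2
--             continue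
--         # 开始 line 注释
--         if not in_line_comment and not in_block_comment and char == "-" and next_char == "-":
--             in_line_comment = True
--             i += 2
--             continue
--         # 结束 line 注释（遇到换行）
--         if in_line_comment and char in "\n\r":
--             in_line_comment = False
--             result.append(char)
--             i += 1
--             continue
--         # 默认追加字符（不在注释中）
--         if not in_line_comment and not in_block_comment:
--             result.append(char)
--         i += 1
--     return ''.join(result)
-- ===== SOURCE B (Python) =====
-- def _remove_sql_comments(sql: str) -> str:
--     # Chunk-scanning tokenizer: find each string/comment token and consume it whole,
--     # instead of a per-character flag state machine.
--     out = []
--     i = 0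
--     n = len(sql)
--     while i < n:
--         c = sql[i]
--         if c == "'" or c == '"':
--             j = sql.find(c, i + 1)
--             if j == -1:
--                 out.append(sql[i:])
--                 i = n
--             else:
--                 out.append(sql[i:j + 1])
--                 i = j + 1
--         elif sql.startswith("--", i):
--             j = i + 2
--             while j < n and sql[j] not in "\n\r":
--                 j += 1
--             i = j  # the terminating newline (if any) is emitted on the next round
--         elif sql.startswith("/*", i):
--             j = sql.find("*/", i + 2)
--             i = n if j == -1 else j + 2
--         else:
--             out.append(c)
--             i += 1
--     return ''.join(out)
-- ===== Notes on version B (the rewrite author's own statement) =====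
-- stated objective: idiomatic
-- what changed: Replaced the per-character four-flag state machine with a chunk-scanning tokenizer that finds each quoted string, line comment or block comment with str.find/startswith and consumes it whole.
import Mathlib
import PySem

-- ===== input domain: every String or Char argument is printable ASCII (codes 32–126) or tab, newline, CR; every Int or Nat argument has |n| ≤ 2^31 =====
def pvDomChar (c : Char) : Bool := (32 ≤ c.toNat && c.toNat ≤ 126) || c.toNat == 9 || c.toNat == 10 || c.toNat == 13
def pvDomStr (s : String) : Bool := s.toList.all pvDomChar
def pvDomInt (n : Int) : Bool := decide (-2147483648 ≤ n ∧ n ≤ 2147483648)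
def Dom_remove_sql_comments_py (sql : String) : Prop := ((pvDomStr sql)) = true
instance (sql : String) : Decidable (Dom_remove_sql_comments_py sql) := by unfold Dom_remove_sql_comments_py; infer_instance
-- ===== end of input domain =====

-- B replaces A's per-character flag state machine by a chunk-consuming tokenizer (same output, same cost).

-- ===== PORT A =====
-- Literal transliteration of A's while loop: the index i becomes recursion on the
-- remaining character list, the four flags are carried as Bool state, branches in
-- the same order; 'i += 2' drops the head and the peeked next char.
def pvLoopA : List Char → Bool → Bool → Bool → Bool → List Char
  | [], _, _, _, _ => []
  | c :: rest, sq, dq, lc, bc =>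
    if (!lc && !bc) && (!dq && c == '\'') then
      c :: pvLoopA rest (!sq) dq lc bc
    else if (!lc && !bc) && (!sq && c == '"') then
      c :: pvLoopA rest sq (!dq) lc bc
    else if sq || dq then
      c :: pvLoopA rest sq dq lc bc
    else if (!lc && !bc) && c == '/' && rest.head? == some '*' then
      pvLoopA rest.tail sq dq lc true
    else if bc && c == '*' && rest.head? == some '/' then
      pvLoopA rest.tail sq dq lc false
    else if (!lc && !bc) && c == '-' && rest.head? == some '-' then
      pvLoopA rest.tail sq dq true bc
    else if lc && (c == '\n' || c == '\r') then
      c :: pvLoopA rest sq dq false bc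
    else if !lc && !bc then
      c :: pvLoopA rest sq dq lc bc
    else
      pvLoopA rest sq dq lc bc
  termination_by l _ _ _ _ => l.length
  decreasing_by all_goals simp

def remove_sql_comments_py (sql : String) : String :=
  String.ofList (pvLoopA sql.toList false false false false)

-- ===== PORT B =====
-- port of Source B's 'find("*/", …)': drop everything through the first "*/"
def pvDropBlock : List Char → List Char
  | [] => []
  | '*' :: '/' :: r => r
  | _ :: r => pvDropBlock r

theorem pvDropBlock_length_le (l : List Char) : (pvDropBlock l).length ≤ l.length := by
  induction l using pvDropBlock.induct <;> simp [pvDropBlock] <;> omega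

-- Source B's while loop: consume one token (quoted string / line comment / block
-- comment / plain char) per round; find(c, i+1) = takeWhile/dropWhile split.
def pvLoopB : List Char → List Char
  | [] => []
  | c :: rest =>
    if c == '\'' || c == '"' then
      match h : rest.dropWhile (fun x => x != c) with
      | [] => c :: rest.takeWhile (fun x => x != c)
      | q :: r => c :: (rest.takeWhile (fun x => x != c) ++ q :: pvLoopB r)
    else if c == '-' && rest.head? == some '-' then
      pvLoopB (rest.tail.dropWhile (fun x => x != '\n' && x != '\r'))
    else if c == '/' && rest.head? == some '*' then
      pvLoopB (pvDropBlock rest.tail)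
    else
      c :: pvLoopB rest
  termination_by l => l.length
  decreasing_by
    · have h1 : (rest.dropWhile (fun x => x != c)).length ≤ rest.length := List.length_dropWhile_le _ _
      rw [h] at h1; simp at h1 ⊢; omega
    · have h1 : (rest.tail.dropWhile (fun x => x != '\n' && x != '\r')).length ≤ rest.tail.length := List.length_dropWhile_le _ _
      have h2 : rest.tail.length ≤ rest.length := by cases rest <;> simp
      simp at h1 ⊢; omega
    · have h1 := pvDropBlock_length_le rest.tail
      have h2 : rest.tail.length ≤ rest.length := by cases rest <;> simp
      simp at h1 ⊢; omega
    · simp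

def remove_sql_comments_py_alt (sql : String) : String :=
  String.ofList (pvLoopB sql.toList)

-- ===== PRECONDITION & SPEC =====
def Spec_remove_sql_comments_py (sql : String) (out : String) : Prop := out = remove_sql_comments_py_alt sql
instance (sql : String) (out : String) : Decidable (Spec_remove_sql_comments_py sql out) := by unfold Spec_remove_sql_comments_py; infer_instance

-- ===== CLAIM (what is proved, stated in full; the proofs are below) =====
def Claim_equal_remove_sql_comments_py : Prop := ∀ (sql : String), Dom_remove_sql_comments_py sql → Spec_remove_sql_comments_py sql (remove_sql_comments_py sql)

-- ===== LEMMAS AND PROOFS =====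

-- A in the in-single-quote state copies verbatim up to and including the closing quote
theorem pv_sq : ∀ (l : List Char), pvLoopA l true false false false =
    l.takeWhile (fun x => x != '\'') ++ (match l.dropWhile (fun x => x != '\'') with
      | [] => [] | q :: r => q :: pvLoopA r false false false false) := by
  intro l
  induction l with
  | nil => simp [pvLoopA]
  | cons c rest ih =>
    by_cases hc : c = '\''
    · subst hc; simp [pvLoopA]
    · simp [pvLoopA, hc, ih]

-- A in the in-double-quote state copies verbatim up to and including the closing quote
theorem pv_dq : ∀ (l : List Char), pvLoopA l false true false false =
    l.takeWhile (fun x => x != '"') ++ (match l.dropWhile (fun x => x != '"') with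
      | [] => [] | q :: r => q :: pvLoopA r false false false false) := by
  intro l
  induction l with
  | nil => simp [pvLoopA]
  | cons c rest ih =>
    by_cases hc : c = '"'
    · subst hc; simp [pvLoopA]
    · simp [pvLoopA, hc, ih]

-- A in the line-comment state drops everything before the next newline/CR
theorem pv_lc : ∀ (l : List Char), pvLoopA l false false true false =
    pvLoopA (l.dropWhile (fun x => x != '\n' && x != '\r')) false false false false := by
  intro l
  induction l with
  | nil => simp [pvLoopA]
  | cons c rest ih =>
    by_cases hn : c = '\n'
    · subst hn; simp [pvLoopA]
    · by_cases hr : c = '\r'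
      · subst hr; simp [pvLoopA]
      · simp [pvLoopA, hn, hr, ih]

-- A in the block-comment state drops everything through the first "*/"
theorem pv_bc : ∀ (l : List Char), pvLoopA l false false false true =
    pvLoopA (pvDropBlock l) false false false false := by
  intro l
  induction l using pvDropBlock.induct with
  | case1 => simp [pvLoopA, pvDropBlock]
  | case2 r => simp [pvLoopA, pvDropBlock]
  | case3 c r h ih =>
    by_cases hc : c = '*'
    · subst hc
      cases r with
      | nil => simp [pvLoopA, pvDropBlock]
      | cons x xs =>
        have hx : x ≠ '/' := fun hx => h xs rfl (by rw [hx])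
        have hd : pvDropBlock ('*' :: x :: xs) = pvDropBlock (x :: xs) := by
          rw [pvDropBlock.eq_def]; simp [hx]
        rw [hd]
        have hA : pvLoopA ('*' :: x :: xs) false false false true =
            pvLoopA (x :: xs) false false false true := by
          simp [pvLoopA, hx]
        rw [hA, ih]
    · have hd : pvDropBlock (c :: r) = pvDropBlock r := by
        rw [pvDropBlock.eq_def]
        cases r with
        | nil => simp [hc]
        | cons x xs => simp [hc]
      rw [hd]
      have hA : pvLoopA (c :: r) false false false true =
          pvLoopA r false false false true := by
        simp [pvLoopA, hc]
      rw [hA, ih]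

theorem pv_main : ∀ (n : Nat) (l : List Char), l.length ≤ n →
    pvLoopA l false false false false = pvLoopB l := by
  intro n
  induction n with
  | zero =>
    intro l hl
    have : l = [] := by cases l with | nil => rfl | cons c r => simp at hl
    subst this; simp [pvLoopA, pvLoopB]
  | succ n ih =>
    intro l hl
    cases l with
    | nil => simp [pvLoopA, pvLoopB]
    | cons c rest =>
      simp only [List.length_cons] at hl
      by_cases h1 : c = '\''
      · subst h1
        have hA : pvLoopA ('\'' :: rest) false false false false =
            '\'' :: pvLoopA rest true false false false := by simp [pvLoopA]
        have hB : pvLoopB ('\'' :: rest) = (match rest.dropWhile (fun x => x != '\'') with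
            | [] => '\'' :: rest.takeWhile (fun x => x != '\'')
            | q :: r => '\'' :: (rest.takeWhile (fun x => x != '\'') ++ q :: pvLoopB r)) := by
          rw [pvLoopB]
          simp only [show (('\'' == '\'') || ('\'' == '"')) = true from rfl, if_true]
          split <;> rename_i heq <;> rw [heq]
        rw [hA, pv_sq, hB]
        cases hdrop : rest.dropWhile (fun x => x != '\'') with
        | nil => simp
        | cons q r =>
          have hlen := List.length_dropWhile_le (fun x => x != '\'') rest
          rw [hdrop] at hlen
          simp only [List.length_cons] at hlen
          simp [ih r (by omega)]
      · by_cases h2 : c = '"'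
        · subst h2
          have hA : pvLoopA ('"' :: rest) false false false false =
              '"' :: pvLoopA rest false true false false := by simp [pvLoopA]
          have hB : pvLoopB ('"' :: rest) = (match rest.dropWhile (fun x => x != '"') with
              | [] => '"' :: rest.takeWhile (fun x => x != '"')
              | q :: r => '"' :: (rest.takeWhile (fun x => x != '"') ++ q :: pvLoopB r)) := by
            rw [pvLoopB]
            simp only [show (('"' == '\'') || ('"' == '"')) = true from rfl, if_true]
            split <;> rename_i heq <;> rw [heq]
          rw [hA, pv_dq, hB]
          cases hdrop : rest.dropWhile (fun x => x != '"') with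
          | nil => simp
          | cons q r =>
            have hlen := List.length_dropWhile_le (fun x => x != '"') rest
            rw [hdrop] at hlen
            simp only [List.length_cons] at hlen
            simp [ih r (by omega)]
        · by_cases h3 : c = '-' ∧ rest.head? = some '-'
          · obtain ⟨hc, hh⟩ := h3
            subst hc
            have hA : pvLoopA ('-' :: rest) false false false false =
                pvLoopA rest.tail false false true false := by simp [pvLoopA, hh]
            have hlen := List.length_dropWhile_le (fun x => x != '\n' && x != '\r') rest.tail
            have htl : rest.tail.length ≤ rest.length := by cases rest <;> simp
            rw [hA, pv_lc, ih _ (by omega)]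
            simp [pvLoopB, hh]
          · by_cases h4 : c = '/' ∧ rest.head? = some '*'
            · obtain ⟨hc, hh⟩ := h4
              subst hc
              have hA : pvLoopA ('/' :: rest) false false false false =
                  pvLoopA rest.tail false false false true := by simp [pvLoopA, hh]
              have hlen := pvDropBlock_length_le rest.tail
              have htl : rest.tail.length ≤ rest.length := by cases rest <;> simp
              rw [hA, pv_bc, ih _ (by omega)]
              simp [pvLoopB, hh]
            · have hb3 : (c == '-' && rest.head? == some '-') = false := by
                by_cases hc : c = '-' <;> by_cases hh : rest.head? = some '-' <;>
                  simp [hc, hh] <;> exact absurd ⟨hc, hh⟩ h3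
              have hb4 : (c == '/' && rest.head? == some '*') = false := by
                by_cases hc : c = '/' <;> by_cases hh : rest.head? = some '*' <;>
                  simp [hc, hh] <;> exact absurd ⟨hc, hh⟩ h4
              have hA : pvLoopA (c :: rest) false false false false =
                  c :: pvLoopA rest false false false false := by
                simp [pvLoopA, h1, h2, hb3, hb4]
              have hB : pvLoopB (c :: rest) = c :: pvLoopB rest := by
                simp [pvLoopB, h1, h2, hb3, hb4]
              rw [hA, hB, ih rest (by omega)]

-- ===== VERDICT (by name: the statement is the Claim_ definition above) =====
theorem remove_sql_comments_py_spec : Claim_equal_remove_sql_comments_py := by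
  intro sql _
  unfold Spec_remove_sql_comments_py remove_sql_comments_py remove_sql_comments_py_alt
  rw [pv_main sql.toList.length _ le_rfl]
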